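-- pv_equiv track=rewrite | github.com/DanielMunozT/relevamiento-deptos | generar.py | completarConElAnterior
-- ===== SOURCE A (Python) =====
-- def completarConElAnterior(rango, rangoAnterior, maxRango):
--     for i in range(1, maxRango + 1):
--         if i in rango: # Al primero retorno
--             return rango
--         else:
--             if i in rangoAnterior:
--                 rango[i] = rangoAnterior[i]
--     return rango
-- ===== SOURCE B (Python) =====
-- def completarConElAnterior(rango, rangoAnterior, maxRango):
--     limit = min((k for k in rango if 1 <= k <= maxRango), default=maxRango + 1)
--     for k in sorted(k for k in rangoAnterior if 1 <= k < limit):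
--         rango[k] = rangoAnterior[k]
--     return rango
-- ===== Notes on version B (the rewrite author's own statement) =====
-- stated objective: alternative
-- what changed: Instead of scanning i = 1..maxRango one by one with an early return, B computes the first existing index directly as the minimum key of rango in [1, maxRango] and copies only the rangoAnterior keys below it, in sorted order; it no longer iterates over the range at all.
import Mathlib
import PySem

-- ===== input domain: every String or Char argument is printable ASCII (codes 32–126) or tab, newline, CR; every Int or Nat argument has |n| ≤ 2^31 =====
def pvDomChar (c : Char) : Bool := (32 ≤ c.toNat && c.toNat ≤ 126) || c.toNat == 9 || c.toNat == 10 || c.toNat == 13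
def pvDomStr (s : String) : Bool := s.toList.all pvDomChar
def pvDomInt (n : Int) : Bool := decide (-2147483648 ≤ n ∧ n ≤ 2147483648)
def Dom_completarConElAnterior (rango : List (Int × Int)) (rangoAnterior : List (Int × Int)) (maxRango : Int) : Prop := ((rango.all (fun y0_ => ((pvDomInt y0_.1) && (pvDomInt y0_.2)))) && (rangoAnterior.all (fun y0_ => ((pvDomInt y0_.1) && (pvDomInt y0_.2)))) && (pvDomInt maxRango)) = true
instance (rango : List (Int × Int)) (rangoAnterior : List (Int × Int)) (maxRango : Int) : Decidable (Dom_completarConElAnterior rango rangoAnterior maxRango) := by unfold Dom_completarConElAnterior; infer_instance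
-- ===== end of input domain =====

-- B replaces A's scan over 1..maxRango by taking the minimum rango key in [1, maxRango] and copying
-- only the rangoAnterior keys below it, in sorted order (objective: alternative). Both Pythons
-- mutate `rango` identically (they fill in the same keys with the same values) and return it.


-- ===== PORT A =====
-- the `for i in range(1, maxRango+1)` loop with its early `return rango`
-- fuel = the number of remaining indices of range(1, maxRango+1), i = the current index
def pvLoopA (ra : PySem.Dict Int Int) (d : PySem.Dict Int Int) : Nat → Int → PySem.Dict Int Int
  | 0, _ => d
  | Nat.succ n, i =>
    if d.contains i then d
    else
      match ra.get? i with
      | some v => pvLoopA ra (d.insert i v) n (i + 1)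
      | none => pvLoopA ra d n (i + 1)

def completarConElAnterior (rango : List (Int × Int)) (rangoAnterior : List (Int × Int)) (maxRango : Int) : List (Int × Int) :=
  (pvLoopA (PySem.Dict.mk rangoAnterior) (PySem.Dict.mk rango) maxRango.toNat 1).items

-- ===== PORT B =====
def completarConElAnterior_alt (rango : List (Int × Int)) (rangoAnterior : List (Int × Int)) (maxRango : Int) : List (Int × Int) :=
  let d := PySem.Dict.mk rango
  let ra := PySem.Dict.mk rangoAnterior
  -- limit = min((k for k in rango if 1 <= k <= maxRango), default=maxRango + 1)
  let limit := PySem.List.minD (d.keys.filter (fun k => decide (1 ≤ k) && decide (k ≤ maxRango))) (fun k => k) (maxRango + 1)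
  -- for k in sorted(k for k in rangoAnterior if 1 <= k < limit): rango[k] = rangoAnterior[k]
  ((PySem.List.sorted (ra.keys.filter (fun k => decide (1 ≤ k) && decide (k < limit))) (fun k => k)).foldl
      (fun acc k => acc.insert k (ra.getD k 0)) d).items

-- ===== PRECONDITION & SPEC =====
def Spec_completarConElAnterior (rango : List (Int × Int)) (rangoAnterior : List (Int × Int)) (maxRango : Int) (out : List (Int × Int)) : Prop := out = completarConElAnterior_alt rango rangoAnterior maxRango
instance (rango : List (Int × Int)) (rangoAnterior : List (Int × Int)) (maxRango : Int) (out : List (Int × Int)) : Decidable (Spec_completarConElAnterior rango rangoAnterior maxRango out) := by unfold Spec_completarConElAnterior; infer_instance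

-- ===== CLAIM (what is proved, stated in full; the proofs are below) =====
def Claim_equal_completarConElAnterior : Prop := ∀ (rango : List (Int × Int)) (rangoAnterior : List (Int × Int)) (maxRango : Int), Dom_completarConElAnterior rango rangoAnterior maxRango → Spec_completarConElAnterior rango rangoAnterior maxRango (completarConElAnterior rango rangoAnterior maxRango)

-- ===== LEMMAS AND PROOFS =====

-- the first index of `d` in [a, b), or b if there is none (how B computes where A's loop stops)
def pvLim (d : PySem.Dict Int Int) (a b : Int) : Int :=
  PySem.List.minD (d.keys.filter (fun k => decide (a ≤ k) && decide (k < b))) (fun k => k) b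

theorem pvLim_le (d : PySem.Dict Int Int) (a b x : Int) (hx : x ∈ d.keys) (h1 : a ≤ x) (h2 : x < b) :
    pvLim d a b ≤ x := by
  unfold pvLim PySem.List.minD
  have hxf : x ∈ d.keys.filter (fun k => decide (a ≤ k) && decide (k < b)) := by
    simp [List.mem_filter, hx, h1, h2]
  cases hmin : PySem.List.min? (d.keys.filter (fun k => decide (a ≤ k) && decide (k < b))) (fun k => k) with
  | none =>
    rw [PySem.List.min?_eq_none_iff] at hmin
    rw [hmin] at hxf; simp at hxf
  | some m =>
    simpa using PySem.List.min?_isMin hmin x hxf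

theorem pvLim_cases (d : PySem.Dict Int Int) (a b : Int) :
    pvLim d a b = b ∨ (pvLim d a b ∈ d.keys ∧ a ≤ pvLim d a b ∧ pvLim d a b < b) := by
  unfold pvLim PySem.List.minD
  cases hmin : PySem.List.min? (d.keys.filter (fun k => decide (a ≤ k) && decide (k < b))) (fun k => k) with
  | none => left; rfl
  | some m =>
    right
    have := PySem.List.min?_mem hmin
    simp [List.mem_filter] at this
    simpa using this

theorem pvLim_eq_self (d : PySem.Dict Int Int) (a b : Int) (ha : a ∈ d.keys) (hab : a < b) :
    pvLim d a b = a := by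
  have hle := pvLim_le d a b a ha le_rfl hab
  rcases pvLim_cases d a b with h | ⟨_, h2, _⟩
  · omega
  · omega

theorem pvLim_of_le (d : PySem.Dict Int Int) (a b : Int) (h : b ≤ a) : pvLim d a b = b := by
  unfold pvLim
  have : d.keys.filter (fun k => decide (a ≤ k) && decide (k < b)) = [] := by
    apply List.filter_eq_nil_iff.mpr
    intro x _; simp; omega
  rw [this]; rfl

theorem pvLim_shift (d : PySem.Dict Int Int) (a b : Int) (ha : a ∉ d.keys) :
    pvLim d (a + 1) b = pvLim d a b := by
  unfold pvLim
  congr 1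
  apply List.filter_congr
  intro x hx
  have hne : x ≠ a := fun h => ha (h ▸ hx)
  have : decide (a + 1 ≤ x) = decide (a ≤ x) := decide_eq_decide.mpr (by omega)
  rw [this]

theorem pvLim_insert (d : PySem.Dict Int Int) (a b v : Int) (ha : d.contains a = false) :
    pvLim (d.insert a v) (a + 1) b = pvLim d (a + 1) b := by
  unfold pvLim
  rw [PySem.Dict.keys_insert_of_not_contains d v ha, List.filter_append]
  have : [a].filter (fun k => decide (a + 1 ≤ k) && decide (k < b)) = [] := by
    simp
  rw [this, List.append_nil]

theorem pvRange_nil (a b : Int) (h : b ≤ a) : PySem.List.pyRange a b = [] := by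
  apply List.eq_nil_iff_forall_not_mem.mpr
  intro x hx
  rw [PySem.List.mem_pyRange_one] at hx; omega

theorem pvRange_pairwise : ∀ (n : Nat) (a b : Int), b ≤ a + n →
    (PySem.List.pyRange a b).Pairwise (· < ·) := by
  intro n
  induction n with
  | zero =>
    intro a b h
    rw [pvRange_nil a b (by omega)]; exact List.Pairwise.nil
  | succ n ih =>
    intro a b h
    by_cases hab : a < b
    · rw [PySem.List.pyRange_one_cons hab]
      refine List.pairwise_cons.mpr ⟨?_, ih (a + 1) b (by push_cast at h ⊢; omega)⟩
      intro x hx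
      rw [PySem.List.mem_pyRange_one] at hx; omega
    · rw [pvRange_nil a b (by omega)]; exact List.Pairwise.nil

-- A's early-returning scan as a fold of inserts over the indices below pvLim
theorem pvA_char (ra : PySem.Dict Int Int) :
    ∀ (n : Nat) (a : Int) (d : PySem.Dict Int Int),
    pvLoopA ra d n a =
      ((PySem.List.pyRange a (pvLim d a (a + n))).filter (fun i => ra.contains i)).foldl
        (fun acc k => acc.insert k (ra.getD k 0)) d := by
  intro n
  induction n with
  | zero =>
    intro a d
    rw [pvLim_of_le d a (a + (0 : Nat)) (by omega), pvRange_nil a (a + (0 : Nat)) (by omega)]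
    rfl
  | succ n ih =>
    intro a d
    set b : Int := a + (Nat.succ n : Nat) with hbdef
    have hab : a < b := by rw [hbdef]; push_cast; omega
    · by_cases hc : d.contains a
      · have ham : pvLim d a b = a :=
          pvLim_eq_self d a b ((PySem.Dict.contains_iff_mem_keys d a).mp hc) hab
        rw [ham, pvRange_nil a a le_rfl]
        simp [pvLoopA, hc]
      · have hcf : d.contains a = false := by simpa using hc
        have hak : a ∉ d.keys := by
          rw [← PySem.Dict.contains_iff_mem_keys]; simp [hcf]
        have hma : a < pvLim d a b := by
          rcases pvLim_cases d a b with h1 | ⟨h1, h2, _⟩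
          · omega
          · have : pvLim d a b ≠ a := fun he => hak (he ▸ h1)
            omega
        have hbe : (a + 1) + (n : Nat) = b := by rw [hbdef]; push_cast; ring
        cases hg : ra.get? a with
        | some v =>
          have hrc : ra.contains a = true := by
            by_contra hrc'
            have : ra.get? a = none :=
              (PySem.Dict.get?_eq_none_iff_contains ra a).mpr (by simpa using hrc')
            simp [this] at hg
          have hgd : ra.getD a 0 = v := by
            rw [PySem.Dict.getD_eq_get?_getD, hg]; rfl
          have hstep : pvLoopA ra d (Nat.succ n) a = pvLoopA ra (d.insert a v) n (a + 1) := by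
            simp [pvLoopA, hcf, hg]
          rw [hstep, ih (a + 1) (d.insert a v), hbe,
            pvLim_insert d a b v hcf, pvLim_shift d a b hak,
            PySem.List.pyRange_one_cons hma, List.filter_cons_of_pos (by simp [hrc]),
            List.foldl_cons, hgd]
        | none =>
          have hrc : ra.contains a = false :=
            (PySem.Dict.get?_eq_none_iff_contains ra a).mp hg
          have hstep : pvLoopA ra d (Nat.succ n) a = pvLoopA ra d n (a + 1) := by
            simp [pvLoopA, hcf, hg]
          rw [hstep, ih (a + 1) d, hbe, pvLim_shift d a b hak,
            PySem.List.pyRange_one_cons hma, List.filter_cons_of_neg (by simp [hrc])]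

-- folding inserts (value a function of the key) over a ≤-sorted key list = folding over its dedup
theorem pvFoldl_insert_dedup (ra : PySem.Dict Int Int) :
    ∀ (l : List Int), l.Pairwise (· ≤ ·) → ∀ d : PySem.Dict Int Int,
    l.foldl (fun acc k => acc.insert k (ra.getD k 0)) d =
      l.dedup.foldl (fun acc k => acc.insert k (ra.getD k 0)) d := by
  intro l
  induction l with
  | nil => intro _ d; rfl
  | cons a t ih =>
    intro hp d
    obtain ⟨h1, h2⟩ := List.pairwise_cons.mp hp
    by_cases hmem : a ∈ t
    · cases t with
      | nil => simp at hmem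
      | cons x t' =>
        have hxa : x = a := by
          rcases List.mem_cons.mp hmem with h | h
          · omega
          · have hx1 := (List.pairwise_cons.mp h2).1 a h
            have hx2 := h1 x (List.mem_cons_self)
            omega
        subst hxa
        have hcollapse : (x :: x :: t').foldl (fun acc k => acc.insert k (ra.getD k 0)) d =
            (x :: t').foldl (fun acc k => acc.insert k (ra.getD k 0)) d := by
          simp [List.foldl_cons, PySem.Dict.insert_insert_self]
        rw [List.dedup_cons_of_mem hmem, hcollapse]
        exact ih h2 d
    · rw [List.dedup_cons_of_notMem hmem, List.foldl_cons, List.foldl_cons]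
      exact ih h2 (d.insert a (ra.getD a 0))

-- B's sorted filtered key list folds like A's filtered range
theorem pvB_fold_eq (ra : PySem.Dict Int Int) (m : Int) (hn : ∃ n : Nat, m ≤ 1 + (n : Int))
    (d : PySem.Dict Int Int) :
    (PySem.List.sorted (ra.keys.filter (fun k => decide (1 ≤ k) && decide (k < m))) (fun k => k)).foldl
        (fun acc k => acc.insert k (ra.getD k 0)) d =
      ((PySem.List.pyRange 1 m).filter (fun i => ra.contains i)).foldl
        (fun acc k => acc.insert k (ra.getD k 0)) d := by
  obtain ⟨n, hnm⟩ := hn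
  set S := PySem.List.sorted (ra.keys.filter (fun k => decide (1 ≤ k) && decide (k < m))) (fun k => k) with hS
  have hSp : S.Pairwise (· ≤ ·) := PySem.List.sorted_pairwise _ _
  rw [pvFoldl_insert_dedup ra S hSp d]
  have hRp : (PySem.List.pyRange 1 m).Pairwise (· < ·) := pvRange_pairwise n 1 m hnm
  have hRfp : ((PySem.List.pyRange 1 m).filter (fun i => ra.contains i)).Pairwise (· < ·) :=
    hRp.sublist List.filter_sublist
  have hdedup : S.dedup = (PySem.List.pyRange 1 m).filter (fun i => ra.contains i) := by
    apply PySem.List.eq_of_perm_of_pairwise_le_of_injective (key := fun x => x)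
      (fun x y h => h)
    · rw [List.perm_ext_iff_of_nodup (List.nodup_dedup _)
        (hRfp.imp (fun h => Int.ne_of_lt h))]
      intro x
      rw [List.mem_dedup, hS, (PySem.List.sorted_perm _ _ _).mem_iff,
        List.mem_filter, List.mem_filter, PySem.List.mem_pyRange_one,
        ← PySem.Dict.contains_iff_mem_keys]
      constructor
      · rintro ⟨hk, hb⟩; simp at hb; exact ⟨⟨hb.1, hb.2⟩, hk⟩
      · rintro ⟨⟨hb1, hb2⟩, hk⟩; exact ⟨hk, by simp [hb1, hb2]⟩
    · exact (hSp.sublist (List.dedup_sublist _))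
    · exact hRfp.imp (fun h => le_of_lt h)
  rw [hdedup]

-- ===== VERDICT (by name: the statement is the Claim_ definition above) =====
theorem completarConElAnterior_spec : Claim_equal_completarConElAnterior := by
  intro rango rangoAnterior maxRango _
  unfold Spec_completarConElAnterior completarConElAnterior completarConElAnterior_alt
  set d := PySem.Dict.mk rango with hd
  set ra := PySem.Dict.mk rangoAnterior with hra
  have hlim : PySem.List.minD (d.keys.filter (fun k => decide (1 ≤ k) && decide (k ≤ maxRango)))
      (fun k => k) (maxRango + 1) = pvLim d 1 (maxRango + 1) := by
    unfold pvLim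
    congr 1
    apply List.filter_congr
    intro x _
    have : decide (x ≤ maxRango) = decide (x < maxRango + 1) := decide_eq_decide.mpr (by omega)
    rw [this]
  simp only [hlim]
  rw [pvA_char ra maxRango.toNat 1 d]
  by_cases hpos : 0 ≤ maxRango
  · have hbe : (1 : Int) + (maxRango.toNat : Nat) = maxRango + 1 := by omega
    rw [hbe,
      pvB_fold_eq ra (pvLim d 1 (maxRango + 1))
        ⟨maxRango.toNat, by
          rcases pvLim_cases d 1 (maxRango + 1) with h | ⟨_, _, h⟩ <;> omega⟩ d]
  · -- maxRango < 0: both sides leave d untouched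
    have hneg : maxRango < 0 := by omega
    have ht : maxRango.toNat = 0 := by omega
    have h1 : pvLim d 1 ((1 : Int) + (maxRango.toNat : Nat)) = 1 := by
      rw [ht]; exact pvLim_of_le d 1 (1 + ((0 : Nat) : Int)) (by omega)
    have h2 : pvLim d 1 (maxRango + 1) = maxRango + 1 :=
      pvLim_of_le d 1 (maxRango + 1) (by omega)
    have h3 : ra.keys.filter (fun k => decide (1 ≤ k) && decide (k < pvLim d 1 (maxRango + 1))) = [] := by
      apply List.filter_eq_nil_iff.mpr
      intro x _; rw [h2]; simp; omega
    rw [h1, pvRange_nil 1 1 le_rfl, h3]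
    rfl
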